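-- pv_equiv track=rewrite | github.com/xiaohaosang/Python_for_TB | Connect_TB_Python_Trade/localtrade/localtrade_20191223/BackTest_mutilproduct.py | IntersectionData
-- ===== SOURCE A (Python) =====
-- def IntersectionData(data_raw_list):
--     if (None in data_raw_list) or (not data_raw_list):
--         return (None,None)
--     time_inter = set([(i[0], i[1]) for i in data_raw_list[0]])
--     for data_raw in data_raw_list[1:]:
--         time_inter=set([(i[0],i[1]) for i in data_raw])&time_inter
--     if not time_inter: return (None,None)
--     time_inter = sorted(sorted(time_inter, key=lambda x: x[1], reverse=False), key=lambda x: x[0], reverse=False)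
--     inter_data_list=[]
--     for data_raw in data_raw_list:
--           inter_data=[i for i in data_raw if (i[0],i[1]) in time_inter]
--           inter_data_list.append(inter_data)
--     return (time_inter,inter_data_list)
-- ===== SOURCE B (Python) =====
-- def IntersectionData(data_raw_list):
--     if (None in data_raw_list) or (not data_raw_list):
--         return (None, None)
--     n = len(data_raw_list)
--     counts = {}
--     for data_raw in data_raw_list:
--         for k in dict.fromkeys((i[0], i[1]) for i in data_raw):
--             counts[k] = counts.get(k, 0) + 1
--     keys = sorted(k for k, c in counts.items() if c == n)
--     if not keys:
--         return (None, None)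
--     keyset = set(keys)
--     return (keys, [[i for i in data_raw if (i[0], i[1]) in keyset]
--                    for data_raw in data_raw_list])
-- ===== Notes on version B (the rewrite author's own statement) =====
-- stated objective: alternative
-- what changed: Replaces A's iterated pairwise set-intersections and its per-row membership test in the sorted intersection list by a single-pass frequency table (a key is kept iff its per-dataset-deduplicated count equals the number of datasets) plus a set-based row filter.
import Mathlib
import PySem

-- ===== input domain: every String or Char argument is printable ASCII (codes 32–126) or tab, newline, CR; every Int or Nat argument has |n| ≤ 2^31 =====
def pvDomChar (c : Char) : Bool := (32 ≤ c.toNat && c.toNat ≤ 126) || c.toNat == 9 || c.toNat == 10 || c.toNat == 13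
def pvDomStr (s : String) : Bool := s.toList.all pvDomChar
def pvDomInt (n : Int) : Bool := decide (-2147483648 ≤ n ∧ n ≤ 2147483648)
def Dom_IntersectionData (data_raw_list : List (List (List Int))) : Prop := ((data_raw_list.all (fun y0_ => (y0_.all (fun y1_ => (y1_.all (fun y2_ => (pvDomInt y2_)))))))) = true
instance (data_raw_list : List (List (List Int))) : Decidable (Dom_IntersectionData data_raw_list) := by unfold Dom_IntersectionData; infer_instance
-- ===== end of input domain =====

-- B replaces A's iterated pairwise set-intersections and its per-row membership test in a sorted LIST by a
-- one-pass frequency table (key kept iff its count equals the number of datasets) and a set-based row filter.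
-- The equivalence is about the return value only; neither program mutates its argument.

-- (i[0], i[1]) of a row; both Pythons write it inline (total form pyGetD, exact under Pre_)
def pvKey (i : List Int) : Int × Int := (PySem.List.pyGetD i 0 0, PySem.List.pyGetD i 1 0)

-- ===== PORT A =====
def IntersectionData (data_raw_list : List (List (List Int))) : (Option (List (Int × Int))) × Option (List (List (List Int))) :=
  -- 'None in data_raw_list' cannot hold under the type convention (no None in List); the empty test remains
  if data_raw_list = [] then (none, none) else
  let time_inter0 : PySem.Set (Int × Int) := PySem.Set.ofList ((data_raw_list.headD []).map pvKey)
  let time_inter : PySem.Set (Int × Int) :=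
    (PySem.List.slice data_raw_list (some 1) none).foldl
      (fun acc data_raw => PySem.Set.inter (PySem.Set.ofList (data_raw.map pvKey)) acc) time_inter0
  if time_inter = [] then (none, none) else
  let time_inter_s : List (Int × Int) :=
    PySem.List.sorted (PySem.List.sorted time_inter (fun x => x.2) false) (fun x => x.1) false
  let inter_data_list : List (List (List Int)) :=
    data_raw_list.foldl
      (fun acc data_raw => acc ++ [data_raw.filter (fun i => decide (pvKey i ∈ time_inter_s))]) []
  (some time_inter_s, some inter_data_list)

-- ===== PORT B =====
def IntersectionData_alt (data_raw_list : List (List (List Int))) : (Option (List (Int × Int))) × Option (List (List (List Int))) :=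
  if data_raw_list = [] then (none, none) else
  let n : Int := (data_raw_list.length : Int)
  let counts : PySem.Dict (Int × Int) Int :=
    data_raw_list.foldl
      (fun cnt data_raw =>
        (PySem.List.dedup (data_raw.map pvKey)).foldl (fun c k => c.modify k 0 (· + 1)) cnt)
      PySem.Dict.empty
  let keys : List (Int × Int) :=
    PySem.List.sorted2 ((counts.items.filter (fun p => p.2 == n)).map Prod.fst)
      (fun x => x.1) (fun x => x.2) false
  if keys = [] then (none, none) else
  let keyset : PySem.Set (Int × Int) := PySem.Set.ofList keys
  (some keys,
   some (data_raw_list.map (fun data_raw => data_raw.filter (fun i => PySem.Set.contains keyset (pvKey i)))))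

-- ===== PRECONDITION & SPEC =====
-- Pre_ excludes exactly the inputs where Python A raises IndexError: some row has fewer than 2 entries.
def Pre_IntersectionData (data_raw_list : List (List (List Int))) : Prop :=
  (data_raw_list.all (fun data_raw => data_raw.all (fun i => 2 ≤ i.length))) = true
instance (data_raw_list : List (List (List Int))) : Decidable (Pre_IntersectionData data_raw_list) := by unfold Pre_IntersectionData; infer_instance

def pvWitness_IntersectionData : List (List (List Int)) :=
  [[[1, 2], [3, 4, 5]], [[1, 2, 9], [0, 0]]]

def Spec_IntersectionData (data_raw_list : List (List (List Int))) (out : (Option (List (Int × Int))) × Option (List (List (List Int)))) : Prop := out = IntersectionData_alt data_raw_list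
instance (data_raw_list : List (List (List Int))) (out : (Option (List (Int × Int))) × Option (List (List (List Int)))) : Decidable (Spec_IntersectionData data_raw_list out) := by unfold Spec_IntersectionData; infer_instance

-- ===== CLAIM (what is proved, stated in full; the proofs are below) =====
def Claim_equal_IntersectionData : Prop := ∀ (data_raw_list : List (List (List Int))), Dom_IntersectionData data_raw_list → Pre_IntersectionData data_raw_list → Spec_IntersectionData data_raw_list (IntersectionData data_raw_list)

-- ===== LEMMAS AND PROOFS =====

-- strict lexicographic order on pairs: the order both final key lists are sorted in
def pvLex (a b : Int × Int) : Prop := a.1 < b.1 ∨ (a.1 = b.1 ∧ a.2 < b.2)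

theorem pvLex_trans {a b c : Int × Int} (h1 : pvLex a b) (h2 : pvLex b c) : pvLex a c := by
  unfold pvLex at *; rcases h1 with h1 | ⟨h1, h1'⟩ <;> rcases h2 with h2 | ⟨h2, h2'⟩ <;> omega

theorem pvLex_antisymm {a b : Int × Int} (h1 : pvLex a b) (h2 : pvLex b a) : a = b := by
  exfalso; unfold pvLex at *
  rcases h1 with h1 | ⟨h1, h1'⟩ <;> rcases h2 with h2 | ⟨h2, h2'⟩ <;> omega

theorem pvInsertBy_nil {α : Type} (before : α → α → Bool) (x : α) :
    PySem.List.insertBy before x [] = [x] := rfl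

theorem pvInsertBy_cons {α : Type} (before : α → α → Bool) (x y : α) (ys : List α) :
    PySem.List.insertBy before x (y :: ys) =
      if before x y then x :: y :: ys else y :: PySem.List.insertBy before x ys := rfl

theorem pvPairwise_insertBy {α : Type} (R : α → α → Prop)
    (htr : ∀ a b c, R a b → R b c → R a c) (before : α → α → Bool) (x : α) :
    ∀ (ys : List α), ys.Pairwise R →
      (∀ y ∈ ys, (before x y = true → R x y) ∧ (before x y = false → R y x)) →
      (PySem.List.insertBy before x ys).Pairwise R := by
  intro ys
  induction ys with
  | nil => intro _ _; simp [pvInsertBy_nil]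
  | cons y ys ih =>
    intro hys hx
    rw [pvInsertBy_cons]
    rcases List.pairwise_cons.mp hys with ⟨hy, hys'⟩
    have hxy := hx y (List.mem_cons_self ..)
    by_cases hb : before x y = true
    · simp only [hb, if_true]
      refine List.pairwise_cons.mpr ⟨?_, hys⟩
      intro z hz
      rcases List.mem_cons.mp hz with rfl | hz
      · exact hxy.1 hb
      · exact htr x y z (hxy.1 hb) (hy z hz)
    · simp only [hb]
      refine List.pairwise_cons.mpr
        ⟨?_, ih hys' (fun z hz => hx z (List.mem_cons_of_mem _ hz))⟩
      intro z hz
      rcases (PySem.List.mem_insertBy before x z ys).mp hz with rfl | hz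
      · exact hxy.2 (by simpa using hb)
      · exact hy z hz

theorem pvFoldl_insertBy_pairwise {α : Type} (R : α → α → Prop)
    (htr : ∀ a b c, R a b → R b c → R a c) (before : α → α → Bool) :
    ∀ (xs acc : List α), acc.Pairwise R →
      (∀ x ∈ xs, ∀ y ∈ acc, (before x y = true → R x y) ∧ (before x y = false → R y x)) →
      xs.Pairwise (fun a b => (before b a = true → R b a) ∧ (before b a = false → R a b)) →
      (xs.foldl (fun acc x => PySem.List.insertBy before x acc) acc).Pairwise R := by
  intro xs
  induction xs with
  | nil => intro acc hacc _ _; simpa using hacc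
  | cons x xs ih =>
    intro acc hacc hcross hxs
    rcases List.pairwise_cons.mp hxs with ⟨hxhd, hxs'⟩
    simp only [List.foldl_cons]
    refine ih _ (pvPairwise_insertBy R htr before x acc hacc (fun y hy => hcross x (by simp) y hy)) ?_ hxs'
    intro b hb y hy
    rcases (PySem.List.mem_insertBy before x y acc).mp hy with rfl | hy
    · exact hxhd b hb
    · exact hcross b (by simp [hb]) y hy

-- A's outer sort: on a Nodup list already sorted by the second component, sorting (stably) by the first
-- component yields a strictly lex-sorted list.
theorem pvSortedA_pairwise_lex (X : List (Int × Int)) (hnd : X.Nodup)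
    (hq : X.Pairwise (fun a b => a.2 ≤ b.2)) :
    (PySem.List.sorted X (fun x => x.1) false).Pairwise pvLex := by
  rw [PySem.List.sorted_eq_foldl_insertBy]
  refine pvFoldl_insertBy_pairwise pvLex (fun a b c => pvLex_trans) _ X [] (by simp) (by simp) ?_
  have h := List.Pairwise.and hnd hq
  refine h.imp ?_
  rintro a b ⟨hne, hle⟩
  constructor
  · intro hlt
    left; exact of_decide_eq_true hlt
  · intro hge
    have hge' : ¬ (b.1 < a.1) := of_decide_eq_false hge
    by_cases h1 : a.1 < b.1
    · exact Or.inl h1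
    · have he : a.1 = b.1 := le_antisymm (le_of_not_gt hge') (le_of_not_gt h1)
      right; refine ⟨he, lt_of_le_of_ne hle ?_⟩
      intro h2; exact hne (Prod.ext he h2)

-- B's sort: sorted2 of a Nodup list of pairs is strictly lex-sorted.
theorem pvSorted2_pairwise_lex (X : List (Int × Int)) (hnd : X.Nodup) :
    (PySem.List.sorted2 X (fun x => x.1) (fun x => x.2) false).Pairwise pvLex := by
  have hrfl : PySem.List.sorted2 X (fun x => x.1) (fun x => x.2) false
      = X.foldl (fun acc x => PySem.List.insertBy
          (fun a b => decide (a.1 < b.1) || (!decide (b.1 < a.1) && decide (a.2 < b.2))) x acc) [] := rfl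
  rw [hrfl]
  refine pvFoldl_insertBy_pairwise pvLex (fun a b c => pvLex_trans) _ X [] (by simp) (by simp) ?_
  refine hnd.imp ?_
  intro a b hne
  have hne2 : ¬ (a.1 = b.1 ∧ a.2 = b.2) := by
    rintro ⟨h1, h2⟩; exact hne (Prod.ext h1 h2)
  constructor
  · intro hlt
    simp only [Bool.or_eq_true, Bool.and_eq_true, Bool.not_eq_true', decide_eq_true_eq,
      decide_eq_false_iff_not] at hlt
    unfold pvLex
    omega
  · intro hge
    simp only [Bool.or_eq_false_iff, Bool.and_eq_false_iff, decide_eq_false_iff_not,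
      Bool.not_eq_false', decide_eq_true_eq] at hge
    unfold pvLex
    omega

-- membership in A's iterated intersection fold
theorem pvInterFold_mem (tail : List (List (List Int))) :
    ∀ (s : PySem.Set (Int × Int)) (k : Int × Int),
      (k ∈ tail.foldl (fun acc d => PySem.Set.inter (PySem.Set.ofList (d.map pvKey)) acc) s
        ↔ k ∈ s ∧ ∀ d ∈ tail, k ∈ d.map pvKey) := by
  induction tail with
  | nil => intro s k; simp
  | cons d tail ih =>
    intro s k
    simp only [List.foldl_cons, ih, PySem.Set.mem_inter, PySem.Set.mem_ofList, List.mem_cons]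
    constructor
    · rintro ⟨⟨hd, hs⟩, hall⟩
      refine ⟨hs, fun d' hd' => ?_⟩
      rcases hd' with rfl | hd'
      · exact hd
      · exact hall d' hd'
    · rintro ⟨hs, hall⟩
      exact ⟨⟨hall d (Or.inl rfl), hs⟩, fun d' hd' => hall d' (Or.inr hd')⟩

theorem pvInterFold_nodup (tail : List (List (List Int))) :
    ∀ (s : PySem.Set (Int × Int)), s.Nodup →
      (tail.foldl (fun acc d => PySem.Set.inter (PySem.Set.ofList (d.map pvKey)) acc) s).Nodup := by
  induction tail with
  | nil => intro s hs; simpa using hs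
  | cons d tail ih =>
    intro s hs
    simp only [List.foldl_cons]
    exact ih _ (PySem.Set.nodup_inter _ _ (PySem.Set.nodup_ofList _))

-- B's counter: getD counts the datasets containing the key
theorem pvCountsGetD (l : List (List (List Int))) :
    ∀ (cnt : PySem.Dict (Int × Int) Int) (k : Int × Int),
      (l.foldl (fun cnt data_raw =>
          (PySem.List.dedup (data_raw.map pvKey)).foldl (fun c k => c.modify k 0 (· + 1)) cnt) cnt).getD k 0
        = cnt.getD k 0 + (l.countP (fun d => decide (k ∈ d.map pvKey)) : Int) := by
  induction l with
  | nil => intro cnt k; simp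
  | cons d l ih =>
    intro cnt k
    simp only [List.foldl_cons, ih, PySem.Dict.getD_foldl_modify_add_one, List.countP_cons]
    have hcount : (PySem.List.dedup (d.map pvKey)).count k
        = if k ∈ d.map pvKey then 1 else 0 := by
      by_cases hk : k ∈ d.map pvKey
      · rw [if_pos hk]
        exact List.count_eq_one_of_mem (PySem.List.nodup_dedup _) ((PySem.List.mem_dedup _ _).mpr hk)
      · rw [if_neg hk]
        exact List.count_eq_zero.mpr (fun h => hk ((PySem.List.mem_dedup _ _).mp h))
    rw [hcount]
    by_cases hk : k ∈ d.map pvKey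
    · simp [hk]; ring
    · simp [hk]

theorem pvCountsKeysNodup (l : List (List (List Int))) :
    ∀ (cnt : PySem.Dict (Int × Int) Int), cnt.keys.Nodup →
      (l.foldl (fun cnt data_raw =>
          (PySem.List.dedup (data_raw.map pvKey)).foldl (fun c k => c.modify k 0 (· + 1)) cnt) cnt).keys.Nodup := by
  induction l with
  | nil => intro cnt h; simpa using h
  | cons d l ih =>
    intro cnt h
    simp only [List.foldl_cons]
    refine ih _ ?_
    have := PySem.Dict.nodup_keys_foldl_modify_key (PySem.List.dedup (d.map pvKey)) (fun x => x) 0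
      (fun _ _ v => v + 1) cnt h
    simpa using this

-- ===== VERDICT (by name: the statement is the Claim_ definition above) =====
theorem IntersectionData_spec : Claim_equal_IntersectionData := by
  intro l _hdom _hpre
  unfold Spec_IntersectionData
  cases l with
  | nil => simp [IntersectionData, IntersectionData_alt]
  | cons h t =>
    -- A's intersection and B's counter / candidate key list
    set ti : PySem.Set (Int × Int) :=
      t.foldl (fun acc d => PySem.Set.inter (PySem.Set.ofList (d.map pvKey)) acc)
        (PySem.Set.ofList (h.map pvKey)) with hti
    set counts : PySem.Dict (Int × Int) Int :=
      (h :: t).foldl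
        (fun cnt data_raw =>
          (PySem.List.dedup (data_raw.map pvKey)).foldl (fun c k => c.modify k 0 (· + 1)) cnt)
        PySem.Dict.empty with hcounts
    set n : Int := ((h :: t).length : Int) with hn
    set cand : List (Int × Int) := (counts.items.filter (fun p => p.2 == n)).map Prod.fst with hcand
    -- counts invariants
    have hKeysND : counts.keys.Nodup := by
      rw [hcounts]
      exact pvCountsKeysNodup (h :: t) PySem.Dict.empty (by simp)
    have hGetD : ∀ k, counts.getD k 0 = ((h :: t).countP (fun d => decide (k ∈ d.map pvKey)) : Int) := by
      intro k
      rw [hcounts, pvCountsGetD]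
      simp
    -- candidate-list membership
    have hCandMem : ∀ k, k ∈ cand ↔ ∀ d ∈ (h :: t), k ∈ d.map pvKey := by
      intro k
      rw [hcand]
      constructor
      · intro hk
        rcases List.mem_map.mp hk with ⟨p, hp, rfl⟩
        rcases List.mem_filter.mp hp with ⟨hpi, hpn⟩
        have hpn' : p.2 = n := by simpa using hpn
        have hget : counts.get? p.1 = some p.2 := PySem.Dict.get?_of_mem_items counts hpi hKeysND
        have hgd : counts.getD p.1 0 = n := by
          rw [PySem.Dict.getD_eq_get?_getD, hget, hpn']; rfl
        have hcnt := hGetD p.1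
        rw [hgd] at hcnt
        have hlen : (h :: t).countP (fun d => decide (p.1 ∈ d.map pvKey)) = (h :: t).length := by
          rw [hn] at hcnt
          exact_mod_cast hcnt.symm
        intro d hd
        have := List.countP_eq_length.mp hlen d hd
        simpa using this
      · intro hall
        have hlen : (h :: t).countP (fun d => decide (k ∈ d.map pvKey)) = (h :: t).length :=
          List.countP_eq_length.mpr (fun d hd => by simpa using hall d hd)
        have hgd : counts.getD k 0 = n := by rw [hGetD k, hlen, hn]
        have hcont : counts.contains k = true := by
          by_contra hc
          have hc' : counts.contains k = false := by simpa using hc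
          have h0 := PySem.Dict.getD_of_not_contains counts (0 : Int) hc'
          rw [hgd, hn] at h0
          simp only [List.length_cons] at h0
          omega
        have hnone : counts.get? k ≠ none := by
          intro hnone
          rw [PySem.Dict.get?_eq_none_iff_contains] at hnone
          rw [hnone] at hcont
          exact Bool.false_ne_true hcont
        have hget := Option.ne_none_iff_exists'.mp hnone
        rcases hget with ⟨v, hv⟩
        have hvn : v = n := by
          have := PySem.Dict.getD_eq_get?_getD counts k (0 : Int)
          rw [hv] at this
          rw [hgd] at this
          simpa using this.symm
        refine List.mem_map.mpr ⟨(k, v), List.mem_filter.mpr ⟨?_, by simp [hvn]⟩, rfl⟩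
        exact ((PySem.Dict.get?_eq_some_iff_mem_items counts k v hKeysND).mp hv)
    have hCandND : cand.Nodup := by
      rw [hcand]
      have hitems : counts.items = counts.keys.map (fun k => (k, counts.getD k 0)) :=
        PySem.Dict.items_eq_map_keys counts hKeysND 0
      rw [hitems, List.filter_map, List.map_map]
      have : (Prod.fst ∘ fun k => (k, counts.getD k 0)) = id := rfl
      rw [this, List.map_id]
      exact hKeysND.filter _
    -- A's intersection membership / nodup
    have hTiMem : ∀ k, k ∈ ti ↔ ∀ d ∈ (h :: t), k ∈ d.map pvKey := by
      intro k
      rw [hti, pvInterFold_mem]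
      simp [PySem.Set.mem_ofList]
    have hTiND : ti.Nodup := by
      rw [hti]; exact pvInterFold_nodup t _ (PySem.Set.nodup_ofList _)
    -- the two sorted key lists agree
    have hPerm : (PySem.List.sorted (PySem.List.sorted ti (fun x => x.2) false) (fun x => x.1) false).Perm
        (PySem.List.sorted2 cand (fun x => x.1) (fun x => x.2) false) := by
      refine ((PySem.List.sorted_perm _ _ _).trans ((PySem.List.sorted_perm _ _ _).trans ?_)).trans
        (PySem.List.sorted2_perm cand _ _ false).symm
      exact (List.perm_ext_iff_of_nodup hTiND hCandND).mpr
        (fun k => (hTiMem k).trans (hCandMem k).symm)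
    have hSA : (PySem.List.sorted (PySem.List.sorted ti (fun x => x.2) false) (fun x => x.1) false).Pairwise pvLex := by
      refine pvSortedA_pairwise_lex _ ?_ ?_
      · exact (PySem.List.sorted_perm ti (fun x => x.2) false).nodup_iff.mpr hTiND
      · exact PySem.List.sorted_pairwise ti (fun x => x.2)
    have hSB := pvSorted2_pairwise_lex cand hCandND
    have hEQ : PySem.List.sorted (PySem.List.sorted ti (fun x => x.2) false) (fun x => x.1) false
        = PySem.List.sorted2 cand (fun x => x.1) (fun x => x.2) false :=
      List.Perm.eq_of_pairwise (fun a b _ _ hab hba => pvLex_antisymm hab hba) hSA hSB hPerm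
    -- the emptiness tests agree
    have hEmpty : (ti = []) ↔ (PySem.List.sorted2 cand (fun x => x.1) (fun x => x.2) false = []) := by
      rw [← hEQ]
      constructor
      · intro hnil; rw [hnil]; rfl
      · intro hnil
        rw [PySem.List.sorted_eq_nil_iff, PySem.List.sorted_eq_nil_iff] at hnil
        exact hnil
    -- assemble
    simp only [IntersectionData, IntersectionData_alt, PySem.List.slice_from_one,
      List.headD_cons, List.tail_cons, if_neg (List.cons_ne_nil h t),
      PySem.List.foldl_append_singleton_eq_map, List.nil_append]
    rw [← hti, ← hcounts, ← hn, ← hcand, hEQ]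
    by_cases hnil : PySem.List.sorted2 cand (fun x => x.1) (fun x => x.2) false = []
    · rw [if_pos (hEmpty.mpr hnil), if_pos hnil]
    · rw [if_neg (fun hh => hnil (hEmpty.mp hh)), if_neg hnil]
      refine Prod.ext rfl ?_
      simp only [Option.some.injEq]
      refine List.map_congr_left ?_
      intro d _
      refine List.filter_congr ?_
      intro i _
      have heself : PySem.Set.ofList (PySem.List.sorted2 cand (fun x => x.1) (fun x => x.2) false)
          = PySem.List.sorted2 cand (fun x => x.1) (fun x => x.2) false :=
        PySem.Set.ofList_eq_self_of_nodup _
          ((PySem.List.sorted2_perm cand _ _ false).nodup_iff.mpr hCandND)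
      rw [heself]
      by_cases hmem : pvKey i ∈ PySem.List.sorted2 cand (fun x => x.1) (fun x => x.2) false
      · simp [hmem]
      · simp [hmem]
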